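-- pv_equiv track=rewrite | github.com/LanluZ/manim-ai | app/ai_clients.py | _find_construct_insert_position
-- ===== SOURCE A (Python) =====
-- def _find_construct_insert_position(lines: list[str]) -> int:
--     """找到 construct 方法中最后一行代码的位置"""
--     found_construct = False
--     last_indented_line = -1
--
--     for i, line in enumerate(lines):
--         if "def construct(self):" in line:
--             found_construct = True
--         # 找到 construct 方法内的最后一行有效代码
--         if found_construct and (line.startswith("    ") or line.startswith("\t")) and line.strip():
--             last_indented_line = i
--
--     if last_indented_line != -1:
--         return last_indented_line + 1
--
--     # 如果找不到，返回 construct 定义的下一行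
--     for i, line in enumerate(lines):
--         if "def construct(self):" in line:
--             return i + 1
--
--     return len(lines)
-- ===== SOURCE B (Python) =====
-- def _find_construct_insert_position(lines: list[str]) -> int:
--     """找到 construct 方法中最后一行代码的位置"""
--     construct_idx = None
--     for i, line in enumerate(lines):
--         if "def construct(self):" in line:
--             construct_idx = i
--             break
--     if construct_idx is None:
--         return len(lines)
--     # scan backwards for the last indented non-blank line at or after the anchor
--     for i, line in reversed(list(enumerate(lines))):
--         if i < construct_idx:
--             break
--         if (line.startswith("    ") or line.startswith("\t")) and line.strip():
--             return i + 1
--     return construct_idx + 1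
-- ===== Notes on version B (the rewrite author's own statement) =====
-- stated objective: simpler
-- what changed: Replaces A's flag-driven full sweep plus a second rescan loop with a find-the-anchor step and a single backward scan that early-exits at the last indented line.
import Mathlib
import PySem

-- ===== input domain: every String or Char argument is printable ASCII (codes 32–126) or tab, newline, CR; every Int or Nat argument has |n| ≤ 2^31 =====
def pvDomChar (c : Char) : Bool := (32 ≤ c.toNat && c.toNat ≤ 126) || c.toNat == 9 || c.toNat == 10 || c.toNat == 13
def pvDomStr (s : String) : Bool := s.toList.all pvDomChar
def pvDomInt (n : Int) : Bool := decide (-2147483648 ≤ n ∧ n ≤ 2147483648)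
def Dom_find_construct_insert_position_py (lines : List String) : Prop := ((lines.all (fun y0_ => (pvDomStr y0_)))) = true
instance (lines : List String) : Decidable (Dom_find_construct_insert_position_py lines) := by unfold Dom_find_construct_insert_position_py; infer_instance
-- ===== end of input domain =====

-- B replaces A's flag-driven full sweep plus second rescan loop by a find-the-anchor step
-- and a single backward scan with early exit; return values agree on all inputs (no mutation).

-- ===== PORT A =====
-- '"def construct(self):" in line'
def pvNeedleIn (l : String) : Bool := PySem.Str.isIn "def construct(self):" l
-- '(line.startswith("    ") or line.startswith("\t")) and line.strip()'
def pvIndented (l : String) : Bool :=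
  (PySem.Str.startswith l "    " || PySem.Str.startswith l "\t") && (PySem.Str.strip l != "")

-- first loop of A: carries (found_construct, last_indented_line)
def pvLoopA : List String → Int → Bool → Int → Bool × Int
  | [], _, found, last => (found, last)
  | l :: rest, i, found, last =>
    let found' := found || pvNeedleIn l
    let last' := if found' && pvIndented l then i else last
    pvLoopA rest (i + 1) found' last'

-- second loop of A: first line containing the needle, else len(lines)
def pvLoopA2 : List String → Int → Int → Int
  | [], _, n => n
  | l :: rest, i, n => if pvNeedleIn l then i + 1 else pvLoopA2 rest (i + 1) n

def find_construct_insert_position_py (lines : List String) : Int :=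
  let r := pvLoopA lines 0 false (-1)
  if r.2 ≠ -1 then r.2 + 1 else pvLoopA2 lines 0 (lines.length : Int)

-- ===== PORT B =====
-- anchor search: first index whose line contains the needle
def pvFindC : List String → Int → Option Int
  | [], _ => none
  | l :: rest, i => if pvNeedleIn l then some i else pvFindC rest (i + 1)

-- backward scan over reversed(list(enumerate(lines))), early break below the anchor
def pvScanB : List (Int × String) → Int → Int
  | [], c => c + 1
  | (i, l) :: rest, c =>
    if i < c then c + 1
    else if pvIndented l then i + 1
    else pvScanB rest c

def find_construct_insert_position_py_alt (lines : List String) : Int :=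
  match pvFindC lines 0 with
  | none => (lines.length : Int)
  | some c => pvScanB (PySem.List.enumerate lines 0).reverse c

-- ===== PRECONDITION & SPEC =====
def Spec_find_construct_insert_position_py (lines : List String) (out : Int) : Prop := out = find_construct_insert_position_py_alt lines
instance (lines : List String) (out : Int) : Decidable (Spec_find_construct_insert_position_py lines out) := by unfold Spec_find_construct_insert_position_py; infer_instance

-- ===== CLAIM (what is proved, stated in full; the proofs are below) =====
def Claim_equal_find_construct_insert_position_py : Prop := ∀ (lines : List String), Dom_find_construct_insert_position_py lines → Spec_find_construct_insert_position_py lines (find_construct_insert_position_py lines)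

-- ===== LEMMAS AND PROOFS =====

theorem pvLoopA_of_findC_none (ls : List String) (i last : Int)
    (h : pvFindC ls i = none) : pvLoopA ls i false last = (false, last) := by
  induction ls generalizing i with
  | nil => rfl
  | cons l rest ih =>
    simp only [pvFindC] at h
    by_cases hl : pvNeedleIn l = true
    · simp [hl] at h
    · simp only [Bool.not_eq_true] at hl
      simp only [pvLoopA, hl, Bool.false_or, Bool.false_and]
      simp only [Bool.false_eq_true, if_false]
      exact ih (i + 1) (by simpa [hl] using h)

theorem pvLoopA_fst_true (ls : List String) (i last : Int) :
    (pvLoopA ls i true last).1 = true := by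
  induction ls generalizing i last with
  | nil => rfl
  | cons l rest ih => simpa [pvLoopA] using ih _ _

theorem pvLoopA_fst (ls : List String) (i last : Int) :
    (pvLoopA ls i false last).1 = (pvFindC ls i).isSome := by
  induction ls generalizing i last with
  | nil => rfl
  | cons l rest ih =>
    by_cases hl : pvNeedleIn l = true
    · simp [pvLoopA, pvFindC, hl, pvLoopA_fst_true]
    · simp only [Bool.not_eq_true] at hl
      simp [pvLoopA, pvFindC, hl, ih]

theorem pvLoopA2_eq (ls : List String) (i n : Int) :
    pvLoopA2 ls i n = match pvFindC ls i with | some c => c + 1 | none => n := by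
  induction ls generalizing i with
  | nil => rfl
  | cons l rest ih =>
    by_cases hl : pvNeedleIn l = true
    · simp [pvLoopA2, pvFindC, hl]
    · simp only [Bool.not_eq_true] at hl
      simp [pvLoopA2, pvFindC, hl, ih]

theorem pvFindC_append (ls : List String) (l : String) (i : Int) :
    pvFindC (ls ++ [l]) i =
      (pvFindC ls i).or (if pvNeedleIn l then some (i + ls.length) else none) := by
  induction ls generalizing i with
  | nil => simp [pvFindC]
  | cons x rest ih =>
    by_cases hx : pvNeedleIn x = true
    · simp [pvFindC, hx]
    · simp only [Bool.not_eq_true] at hx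
      simp [pvFindC, hx, ih]
      ring_nf

theorem pvFindC_bounds (ls : List String) (i c : Int)
    (h : pvFindC ls i = some c) : i ≤ c ∧ c < i + ls.length := by
  induction ls generalizing i with
  | nil => simp [pvFindC] at h
  | cons l rest ih =>
    simp only [pvFindC] at h
    by_cases hl : pvNeedleIn l = true
    · simp [hl] at h
      subst h
      simp only [List.length_cons]
      push_cast
      omega
    · simp only [Bool.not_eq_true] at hl
      rw [if_neg (by simp [hl])] at h
      have := ih (i + 1) h
      simp only [List.length_cons]
      push_cast
      omega

theorem pvLoopA_append (ls : List String) (l : String) (i : Int) (f : Bool) (last : Int) :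
    pvLoopA (ls ++ [l]) i f last =
      (let r := pvLoopA ls i f last;
       let f' := r.1 || pvNeedleIn l;
       (f', if f' && pvIndented l then i + ls.length else r.2)) := by
  induction ls generalizing i f last with
  | nil =>
    simp only [List.nil_append, pvLoopA]
    norm_num
  | cons x rest ih =>
    simp only [List.cons_append, pvLoopA, ih]
    simp only [List.length_cons]
    norm_num
    ring_nf

theorem pvScanB_all_lt (ps : List (Int × String)) (c : Int)
    (h : ∀ p ∈ ps, p.1 < c) : pvScanB ps c = c + 1 := by
  induction ps with
  | nil => rfl
  | cons p rest ih =>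
    obtain ⟨i, l⟩ := p
    simp only [pvScanB, if_pos (h (i, l) (by simp))]

theorem pvEnum_fst_lt (ls : List String) (p : Int × String)
    (h : p ∈ (PySem.List.enumerate ls 0).reverse) : p.1 < (ls.length : Int) := by
  rw [List.mem_reverse] at h
  rw [PySem.List.mem_enumerate_iff] at h
  obtain ⟨k, hk, rfl⟩ := h
  simp
  omega

theorem pvMain (ls : List String) (c : Int) (h : pvFindC ls 0 = some c) :
    pvScanB (PySem.List.enumerate ls 0).reverse c =
      (let r := pvLoopA ls 0 false (-1); if r.2 ≠ -1 then r.2 + 1 else c + 1) := by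
  induction ls using List.reverseRecOn with
  | nil => simp [pvFindC] at h
  | append_singleton ls l ih =>
    have henum : (PySem.List.enumerate (ls ++ [l]) 0).reverse
        = ((ls.length : Int), l) :: (PySem.List.enumerate ls 0).reverse := by
      rw [PySem.List.enumerate_append]
      simp [PySem.List.enumerate_cons, PySem.List.enumerate_nil, List.reverse_append]
    rw [pvFindC_append] at h
    rw [pvLoopA_append, henum]
    cases hfc : pvFindC ls 0 with
    | some c' =>
      rw [hfc] at h
      simp only [Option.some_or] at h
      obtain rfl : c = c' := by injection h with h; exact h.symm
      have hb := pvFindC_bounds ls 0 c hfc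
      have hnotlt : ¬ ((ls.length : Int) < c) := by omega
      have hf0 : (pvLoopA ls 0 false (-1)).1 = true := by
        rw [pvLoopA_fst, hfc]; rfl
      simp only [pvScanB, if_neg hnotlt, hf0, Bool.true_or, Bool.true_and]
      by_cases hind : pvIndented l = true
      · simp [hind]
      · simp only [Bool.not_eq_true] at hind
        simp only [hind, Bool.false_eq_true, if_false]
        exact ih hfc
    | none =>
      rw [hfc] at h
      simp only [Option.none_or] at h
      by_cases hl : pvNeedleIn l = true
      · rw [if_pos hl] at h
        obtain rfl : (0 : Int) + (ls.length : Int) = c := by injection h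
        have h0 := pvLoopA_of_findC_none ls 0 (-1) hfc
        rw [h0]
        simp only [hl, Bool.false_or, Bool.true_and]
        have hnotlt : ¬ ((ls.length : Int) < 0 + (ls.length : Int)) := by omega
        simp only [pvScanB, if_neg hnotlt]
        by_cases hind : pvIndented l = true
        · simp [hind]
        · simp only [Bool.not_eq_true] at hind
          simp only [hind, Bool.false_eq_true, if_false]
          rw [pvScanB_all_lt _ _ (fun p hp => by
            have := pvEnum_fst_lt ls p hp; omega)]
          simp
      · rw [if_neg (by simp [hl])] at h
        cases h

-- ===== VERDICT (by name: the statement is the Claim_ definition above) =====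
theorem find_construct_insert_position_py_spec : Claim_equal_find_construct_insert_position_py := by
  intro lines _
  unfold Spec_find_construct_insert_position_py
  unfold find_construct_insert_position_py find_construct_insert_position_py_alt
  cases hfc : pvFindC lines 0 with
  | none =>
    rw [pvLoopA_of_findC_none lines 0 (-1) hfc]
    simp [pvLoopA2_eq, hfc]
  | some c =>
    have hm := pvMain lines c hfc
    simp only [] at hm
    simp only [pvLoopA2_eq, hfc, hm]
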